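-- pv_equiv track=rewrite | github.com/NVISOsecurity/ee-outliers | app/helpers/utils.py | flatten_fields_into_sentences
-- ===== SOURCE A (Python) =====
-- from typing import Dict, List, Tuple, MutableMapping, Any, Optional, Union, Iterable, TYPE_CHECKING, cast, SupportsInt
--
-- def get_dotkey_value(dict_value: Dict, key_name: str, case_sensitive: bool = True) -> Union[Dict, List]:
--     """
--     Get value by dot key in dictionary
--     By default, the dotkey is matched case sensitive; for example, key "OsqueryFilter.process_name" will only match if
--     the event contains a nested dictionary with keys "OsqueryFilter" and "process_name".
--     By changing the case_sensitive parameter to "False", all elements of the dot key will be matched case insensitive.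
--     For example, key "OsqueryFilter.process_name" will also match a nested dictionary with keys "osqueryfilter" and
--     "prOcEss_nAme".
--
--     :param dict_value: dictionary where the research must be done
--     :param key_name: key of the value (each depth is separated by a dot)
--     :param case_sensitive: True to taking case into account
--     :return: the dictionary value
--     """
--     keys: List[str] = key_name.split(".")
--
--     for k in keys:
--         if not case_sensitive:
--             dict_keys: List[str] = list(dict_value.keys())
--             lowercase_keys: List[str] = list(map(str.lower, dict_keys))
--             lowercase_key_to_match: str = k.lower()
--             if lowercase_key_to_match in lowercase_keys:
--                 matched_index: int = lowercase_keys.index(lowercase_key_to_match)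
--                 dict_value = dict_value[dict_keys[matched_index]]
--             else:
--                 raise KeyError
--         else:
--             dict_value = dict_value[k]
--
--     return dict_value
--
-- def flatten_sentence(sentence: Any = None) -> Optional[str]:
--     """
--     Convert a sentence value into a flat string
--
--     :param sentence: sentence to flat
--     :return: the flat string or None if not possible
--     """
--     if sentence is None:
--         return None
--     field_value: str
--
--     if type(sentence) is list:
--         # Make sure the list does not contain nested lists, but only strings. If it's a nested list, we give up and
--         # return None
--         if any(isinstance(i, list) or isinstance(i, dict) for i in sentence):
--             return None
--         else:
--             # We convert a list value such as [1,2,3] into a single string, so the model can use it: 1-2-3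
--             field_value = " - ".join(str(x) for x in sentence)
--             return field_value
--     elif type(sentence) is dict:
--         return None
--     else:
--         # We just cast to string in all other cases
--         field_value = str(sentence)
--         return field_value
--
-- def flatten_fields_into_sentences(fields: Dict, sentence_format: List) -> List[List]:
--     """
--     Convert a sentence format and a field dictionary into a list of sentence
--
--     :param fields: list of fields (like {hostname: [WIN-DRA, WIN-EVB], draman})
--     :param sentence_format: string with field name (like: hostname, username)
--     :return: list of sentence
--     """
--     sentences: List[List] = [[]]
--
--     for i, field_name in enumerate(sentence_format):
--         dict_value: Union[Dict, List] = get_dotkey_value(fields, field_name, case_sensitive=False)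
--         new_sentences: List[List] = _flatten_one_field_into_sentences(sentences=sentences, dict_value=dict_value)
--         sentences = new_sentences.copy()
--
--     # Remove all sentences that contain fields that could not be parsed, and that have been flattened to "None".
--     # We can't reasonably work with these, so we just ignore them.
--     sentences = [sentence for sentence in sentences if None not in sentence]
--
--     return sentences
--
-- def _flatten_one_field_into_sentences(dict_value: Union[List, Dict],
--                                       sentences: List[List] = list(list())) -> List[List]:
--     new_sentences: List[List] = []
--     if type(dict_value) is list:
--         for field_value in dict_value:
--             flatten_field_value: Optional[str] = flatten_sentence(field_value)
--
--             for sentence in sentences: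
--                 sentence_copy: List = sentence.copy()
--                 sentence_copy.append(flatten_field_value)
--                 new_sentences.append(sentence_copy)
--     else:
--         flatten_dict_value: Optional[str] = flatten_sentence(dict_value)
--         for sentence in sentences:
--             sentence.append(flatten_dict_value)
--             new_sentences.append(sentence)
--
--     return new_sentences
-- ===== SOURCE B (Python) =====
-- def get_dotkey_value(dict_value, key_name, case_sensitive=True):
--     # same-module helper, reused unchanged
--     keys = key_name.split(".")
--     for k in keys:
--         if not case_sensitive:
--             dict_keys = list(dict_value.keys())
--             lowercase_keys = list(map(str.lower, dict_keys))
--             lowercase_key_to_match = k.lower()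
--             if lowercase_key_to_match in lowercase_keys:
--                 matched_index = lowercase_keys.index(lowercase_key_to_match)
--                 dict_value = dict_value[dict_keys[matched_index]]
--             else:
--                 raise KeyError
--         else:
--             dict_value = dict_value[k]
--     return dict_value
--
--
-- def flatten_sentence(sentence=None):
--     # same-module helper, reused unchanged
--     if sentence is None:
--         return None
--     if type(sentence) is list:
--         if any(isinstance(i, list) or isinstance(i, dict) for i in sentence):
--             return None
--         return " - ".join(str(x) for x in sentence)
--     elif type(sentence) is dict:
--         return None
--     else:
--         return str(sentence)
--
--
-- def _product(columns):
--     """Cartesian product of a list of columns, first column varying slowest."""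
--     if not columns:
--         return [[]]
--     head, rest = columns[0], columns[1:]
--     tails = _product(rest)
--     return [[x] + t for x in head for t in tails]
--
--
-- def flatten_fields_into_sentences(fields, sentence_format):
--     # Build the column of flattened values for each field name first,
--     # then take one Cartesian product.  A's loop makes the FIRST field vary
--     # fastest, so we take the product of the reversed columns and reverse
--     # each combination back.
--     columns = []
--     for field_name in sentence_format:
--         value = get_dotkey_value(fields, field_name, case_sensitive=False)
--         if type(value) is list:
--             columns.append([flatten_sentence(v) for v in value])
--         else:
--             columns.append([flatten_sentence(value)])
--     sentences = [list(reversed(combo)) for combo in _product(list(reversed(columns)))]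
--     return [s for s in sentences if None not in s]
-- ===== Notes on version B (the rewrite author's own statement) =====
-- stated objective: alternative
-- what changed: B first resolves each field name to its column of flattened values in one pass, then produces all sentences with a single recursive Cartesian product (over reversed columns, reversing each combination to keep A's first-field-varies-fastest order), instead of A's incremental rebuild-all-sentences fold with nested copy loops per field.
-- outside the precondition, e.g. on flatten_fields_into_sentences({'h': ['a']}, ['x']): A raises KeyError, B raises KeyError
import Mathlib
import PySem

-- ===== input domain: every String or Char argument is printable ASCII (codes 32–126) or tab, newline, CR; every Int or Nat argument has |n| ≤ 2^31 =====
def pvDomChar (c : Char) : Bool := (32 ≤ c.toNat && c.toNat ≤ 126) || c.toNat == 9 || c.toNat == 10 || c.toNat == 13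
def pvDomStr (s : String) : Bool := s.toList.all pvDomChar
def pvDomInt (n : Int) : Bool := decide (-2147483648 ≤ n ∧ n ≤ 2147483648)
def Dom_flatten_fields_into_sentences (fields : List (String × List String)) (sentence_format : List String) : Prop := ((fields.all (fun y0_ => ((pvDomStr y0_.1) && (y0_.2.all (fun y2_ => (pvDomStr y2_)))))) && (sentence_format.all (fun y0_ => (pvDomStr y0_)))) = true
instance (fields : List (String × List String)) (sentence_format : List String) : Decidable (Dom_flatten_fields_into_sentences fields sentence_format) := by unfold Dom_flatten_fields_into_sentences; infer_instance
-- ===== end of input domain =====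

-- B resolves each field name to its column of values first, then takes one recursive
-- Cartesian product (over reversed columns, reversing each combination) instead of A's
-- incremental rebuild-all-sentences fold; same cost, different decomposition.


-- ===== PORT A =====
-- Shared same-module helper get_dotkey_value(fields, key_name, case_sensitive=False),
-- specialised to the dict str -> list[str] domain: a key with a '.' would have to
-- descend into a list value (AttributeError) or miss (KeyError) — either way Python
-- raises, so it yields none, as does a case-insensitively missing key.
def get_dotkey_value_ci (fields : List (String × List String)) (key_name : String) : Option (List String) :=
  match PySem.Str.split? key_name "." with
  | some [k] =>
      let d := PySem.Dict.ofList fields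
      let dict_keys := PySem.Dict.keys d
      let lowercase_keys := dict_keys.map PySem.Str.lower
      match PySem.List.index? lowercase_keys (PySem.Str.lower k) with
      | some i =>
          match PySem.List.pyGet? dict_keys (Int.ofNat i) with
          | some dk => PySem.Dict.get? d dk
          | none => none
      | none => none
  | _ => none

-- flatten_sentence on a str is str(sentence) = the string itself, so on this domain
-- it is the identity; the final 'None not in sentence' filter of A is vacuous here.
def flatten_sentence_str (s : String) : String := s

-- A: incremental fold; for each field, _flatten_one_field_into_sentences rebuilds
-- all sentences (outer loop over the field's values, inner loop over old sentences).
def flatten_fields_into_sentences (fields : List (String × List String)) (sentence_format : List String) : List (List String) :=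
  sentence_format.foldl
    (fun sentences field_name =>
      ((get_dotkey_value_ci fields field_name).getD []).flatMap
        (fun field_value => sentences.map (fun s => s ++ [flatten_sentence_str field_value])))
    [[]]

-- ===== PORT B =====
-- B's _product: recursive Cartesian product, first column varies slowest.
def pyCartProduct (cols : List (List String)) : List (List String) :=
  match cols with
  | [] => [[]]
  | c :: cs => c.flatMap (fun x => (pyCartProduct cs).map (fun t => x :: t))

def flatten_fields_into_sentences_alt (fields : List (String × List String)) (sentence_format : List String) : List (List String) :=
  let columns := sentence_format.map
    (fun field_name => ((get_dotkey_value_ci fields field_name).getD []).map flatten_sentence_str)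
  (pyCartProduct columns.reverse).map List.reverse

-- ===== PRECONDITION & SPEC =====
-- Pre_ excludes exactly the inputs on which Python A raises (KeyError/AttributeError):
-- a field name containing '.' (it would descend into a list value), or one whose
-- lowercase form matches no key of fields.
def Pre_flatten_fields_into_sentences (fields : List (String × List String)) (sentence_format : List String) : Prop :=
  ∀ name ∈ sentence_format,
    ('.' ∉ name.toList) ∧ ∃ p ∈ fields, PySem.Str.lower p.1 = PySem.Str.lower name
instance (fields : List (String × List String)) (sentence_format : List String) : Decidable (Pre_flatten_fields_into_sentences fields sentence_format) := by unfold Pre_flatten_fields_into_sentences; infer_instance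

def pvWitness_flatten_fields_into_sentences : (List (String × List String)) × List String :=
  ([("Host", ["a", "b"]), ("user", ["x"])], ["host", "User"])

def Spec_flatten_fields_into_sentences (fields : List (String × List String)) (sentence_format : List String) (out : List (List String)) : Prop := out = flatten_fields_into_sentences_alt fields sentence_format
instance (fields : List (String × List String)) (sentence_format : List String) (out : List (List String)) : Decidable (Spec_flatten_fields_into_sentences fields sentence_format out) := by unfold Spec_flatten_fields_into_sentences; infer_instance

-- ===== CLAIM (what is proved, stated in full; the proofs are below) =====
def Claim_equal_flatten_fields_into_sentences : Prop := ∀ (fields : List (String × List String)) (sentence_format : List String), Dom_flatten_fields_into_sentences fields sentence_format → Pre_flatten_fields_into_sentences fields sentence_format → Spec_flatten_fields_into_sentences fields sentence_format (flatten_fields_into_sentences fields sentence_format)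

-- ===== LEMMAS AND PROOFS =====
lemma foldl_eq_cartProduct (cols : List (List String)) :
    cols.foldl
      (fun sentences c => c.flatMap (fun v => sentences.map (fun s => s ++ [v]))) [[]]
    = (pyCartProduct cols.reverse).map List.reverse := by
  induction cols using List.reverseRecOn with
  | nil => rfl
  | append_singleton cs c ih =>
      rw [List.foldl_append, ih]
      simp only [List.reverse_append, List.reverse_cons, List.reverse_nil, List.nil_append,
        List.singleton_append, pyCartProduct, List.map_flatMap, List.map_map]
      refine List.flatMap_congr (fun v _ => ?_)
      simp [List.map_map, Function.comp_def]

-- ===== VERDICT (by name: the statement is the Claim_ definition above) =====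
theorem flatten_fields_into_sentences_spec : Claim_equal_flatten_fields_into_sentences := by
  intro fields sentence_format _ _
  unfold Spec_flatten_fields_into_sentences flatten_fields_into_sentences
    flatten_fields_into_sentences_alt flatten_sentence_str
  simp only [List.map_id']
  rw [← foldl_eq_cartProduct, List.foldl_map]
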